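-- pv_equiv track=rewrite | github.com/Hanno1/AdventOfCode2023 | 14_2023.py | move_stones_south
-- ===== SOURCE A (Python) =====
-- def move_stones_south(round_stones, square_stones, rows, cols):
--     first_empty_tile = [-1 for _ in range(cols)]
--     new_round_stones = []
--     for row in range(rows - 1, -1, -1):
--         for col in range(cols):
--             if (row, col) in square_stones:
--                 first_empty_tile[col] = -1
--             elif (row, col) in round_stones:
--                 if first_empty_tile[col] != -1:
--                     # move stone to first empty tile
--                     new_round_stones.append((first_empty_tile[col], col))
--                     first_empty_tile[col] -= 1
--                 else:
--                     # dont move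
--                     new_round_stones.append((row, col))
--             else:
--                 if first_empty_tile[col] == -1:
--                     first_empty_tile[col] = row
--     return new_round_stones
-- ===== SOURCE B (Python) =====
-- def move_stones_south(round_stones, square_stones, rows, cols):
--     # Per-stone closed form instead of a full-grid scan: a round stone at (r, c) lands
--     # at b - 1 - k, where b is the nearest square row below it in its column (or the
--     # grid bottom) and k is the number of round stones strictly between; stones are
--     # emitted bottom row first, left to right, matching the original scan order.
--     def valid(stones):
--         return {p for p in stones if 0 <= p[0] < rows and 0 <= p[1] < cols}
--     squares = valid(square_stones)
--     rounds = valid(round_stones) - squares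
--
--     def new_row(r, c):
--         b = min((s for (s, sc) in squares if sc == c and s > r), default=rows)
--         k = sum(1 for (rr, rc) in rounds if rc == c and r < rr < b)
--         return b - 1 - k
--
--     out = []
--     for r in sorted({p[0] for p in rounds}, reverse=True):
--         for c in sorted(p[1] for p in rounds if p[0] == r):
--             out.append((new_row(r, c), c))
--     return out
-- ===== Notes on version B (the rewrite author's own statement) =====
-- stated objective: faster
-- what changed: A scans every grid cell bottom-up with a mutable per-column first-empty array and list membership tests per cell; B never scans the grid: it deduplicates the in-grid stones into sets and computes each round stone's landing row by a closed form (nearest square row below in its column, minus the count of round stones strictly between), emitting results per stone in the same bottom-up, left-to-right order.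
import Mathlib
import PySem

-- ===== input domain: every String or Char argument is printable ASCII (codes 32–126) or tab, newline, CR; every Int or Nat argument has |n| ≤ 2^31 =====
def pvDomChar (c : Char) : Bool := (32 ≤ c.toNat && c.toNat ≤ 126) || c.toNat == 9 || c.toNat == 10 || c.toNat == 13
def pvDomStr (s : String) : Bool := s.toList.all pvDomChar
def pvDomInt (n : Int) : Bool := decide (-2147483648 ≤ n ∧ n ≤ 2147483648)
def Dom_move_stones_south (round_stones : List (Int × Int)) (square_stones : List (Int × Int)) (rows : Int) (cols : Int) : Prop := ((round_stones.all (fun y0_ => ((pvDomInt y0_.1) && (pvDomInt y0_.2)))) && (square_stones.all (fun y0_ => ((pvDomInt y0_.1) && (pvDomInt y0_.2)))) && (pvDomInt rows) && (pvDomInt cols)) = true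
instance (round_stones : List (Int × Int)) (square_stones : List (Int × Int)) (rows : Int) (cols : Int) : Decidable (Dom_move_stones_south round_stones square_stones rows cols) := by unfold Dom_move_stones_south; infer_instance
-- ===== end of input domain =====

-- B replaces A's full-grid scan with mutable per-column state by a per-stone closed form
-- (nearest square below + count of round stones between), emitted bottom-up, left-to-right.


-- ===== PORT A =====
-- Literal port of A: first_empty_tile is the Int list, updated with pySetD / read with
-- pyGetD (the index col always lies in range(cols), so the getD default -1 is never consulted).
def move_stones_south (round_stones : List (Int × Int)) (square_stones : List (Int × Int)) (rows : Int) (cols : Int) : List (Int × Int) :=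
  ((PySem.List.pyRange (rows - 1) (-1) (-1)).foldl (fun st row =>
    (PySem.List.pyRange 0 cols 1).foldl (fun (st : List Int × List (Int × Int)) col =>
      if square_stones.contains (row, col) then
        (PySem.List.pySetD st.1 col (-1), st.2)
      else if round_stones.contains (row, col) then
        if PySem.List.pyGetD st.1 col (-1) ≠ -1 then
          (PySem.List.pySetD st.1 col (PySem.List.pyGetD st.1 col (-1) - 1),
           st.2 ++ [(PySem.List.pyGetD st.1 col (-1), col)])
        else
          (st.1, st.2 ++ [(row, col)])
      else
        if PySem.List.pyGetD st.1 col (-1) = -1 then (PySem.List.pySetD st.1 col row, st.2)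
        else st) st)
    ((PySem.List.pyRange 0 cols 1).map (fun _ => (-1 : Int)), [])).2

-- ===== PORT B =====
-- valid(stones), rounds, and new_row(r, c) = b - 1 - k from Source B (pvB is new_row's local b:
-- min of the square rows below in the column, with default rows); the main body walks the
-- round-stone rows bottom-up (sorted(..., reverse=True)) and each row's columns in sorted order.
def pvValid (stones : List (Int × Int)) (rows : Int) (cols : Int) : PySem.Set (Int × Int) :=
  PySem.Set.ofList (stones.filter (fun p =>
    decide (0 ≤ p.1) && decide (p.1 < rows) && decide (0 ≤ p.2) && decide (p.2 < cols)))

def pvRounds (R : List (Int × Int)) (S : List (Int × Int)) (rows : Int) (cols : Int) : PySem.Set (Int × Int) :=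
  PySem.Set.diff (pvValid R rows cols) (pvValid S rows cols)
-- b of new_row(r, c)

def pvB (S : List (Int × Int)) (rows : Int) (cols : Int) (r : Int) (c : Int) : Int :=
  PySem.List.minD
    (((pvValid S rows cols).filter (fun p => p.2 == c && decide (r < p.1))).map (fun p => p.1))
    (fun x => x) rows

def pvNewRow (R : List (Int × Int)) (S : List (Int × Int)) (rows : Int) (cols : Int) (r : Int) (c : Int) : Int :=
  pvB S rows cols r c - 1 - (((pvRounds R S rows cols).filter
      (fun p => p.2 == c && decide (r < p.1) && decide (p.1 < pvB S rows cols r c))).length : Int)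

def move_stones_south_alt (round_stones : List (Int × Int)) (square_stones : List (Int × Int)) (rows : Int) (cols : Int) : List (Int × Int) :=
  (PySem.List.sorted (PySem.Set.ofList ((pvRounds round_stones square_stones rows cols).map (fun p => p.1))) (fun x => x) true).foldl
    (fun acc r =>
      acc ++ (PySem.List.sorted (((pvRounds round_stones square_stones rows cols).filter (fun p => p.1 == r)).map (fun p => p.2)) (fun x => x) false).map
        (fun c => (pvNewRow round_stones square_stones rows cols r c, c))) []

-- ===== PRECONDITION & SPEC =====
def Spec_move_stones_south (round_stones : List (Int × Int)) (square_stones : List (Int × Int)) (rows : Int) (cols : Int) (out : List (Int × Int)) : Prop := out = move_stones_south_alt round_stones square_stones rows cols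
instance (round_stones : List (Int × Int)) (square_stones : List (Int × Int)) (rows : Int) (cols : Int) (out : List (Int × Int)) : Decidable (Spec_move_stones_south round_stones square_stones rows cols out) := by unfold Spec_move_stones_south; infer_instance

-- ===== CLAIM (what is proved, stated in full; the proofs are below) =====
def Claim_equal_move_stones_south : Prop := ∀ (round_stones : List (Int × Int)) (square_stones : List (Int × Int)) (rows : Int) (cols : Int), Dom_move_stones_south round_stones square_stones rows cols → Spec_move_stones_south round_stones square_stones rows cols (move_stones_south round_stones square_stones rows cols)

-- ===== LEMMAS AND PROOFS =====

theorem pv_mem_valid (xs : List (Int × Int)) (rows cols : Int) (p : Int × Int) :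
    p ∈ pvValid xs rows cols ↔ (0 ≤ p.1 ∧ p.1 < rows ∧ 0 ≤ p.2 ∧ p.2 < cols ∧ p ∈ xs) := by
  simp [pvValid, PySem.Set.mem_ofList, List.mem_filter]; tauto

theorem pv_mem_bList (S : List (Int × Int)) (rows cols r c : Int) (x : Int) :
    x ∈ ((pvValid S rows cols).filter (fun p => p.2 == c && decide (r < p.1))).map (fun p => p.1) ↔
      ((x, c) ∈ pvValid S rows cols ∧ r < x) := by
  simp only [List.mem_map, List.mem_filter, Bool.and_eq_true, beq_iff_eq, decide_eq_true_eq]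
  constructor
  · rintro ⟨p, ⟨hp, hpc, hpr⟩, rfl⟩
    exact ⟨by rwa [show (p.1, c) = p from by rw [← hpc]], hpr⟩
  · rintro ⟨hm, hr⟩
    exact ⟨(x, c), ⟨hm, rfl, hr⟩, rfl⟩

theorem pv_b_gt (S : List (Int × Int)) (rows cols r c : Int) (hr : r < rows) :
    r < pvB S rows cols r c := by
  unfold pvB PySem.List.minD
  cases h : PySem.List.min? (((pvValid S rows cols).filter (fun p => p.2 == c && decide (r < p.1))).map (fun p => p.1)) (fun x => x) with
  | none => simpa using hr
  | some m =>
      have := PySem.List.min?_mem h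
      rw [pv_mem_bList] at this
      simpa using this.2

theorem pv_b_le_rows (S : List (Int × Int)) (rows cols r c : Int) :
    pvB S rows cols r c ≤ rows := by
  unfold pvB PySem.List.minD
  cases h : PySem.List.min? (((pvValid S rows cols).filter (fun p => p.2 == c && decide (r < p.1))).map (fun p => p.1)) (fun x => x) with
  | none => simp
  | some m =>
      have := PySem.List.min?_mem h
      rw [pv_mem_bList, pv_mem_valid] at this
      simp only [Option.getD_some]
      exact le_of_lt this.1.2.1

theorem pv_b_min (S : List (Int × Int)) (rows cols r c : Int) (s : Int)
    (hs : (s, c) ∈ pvValid S rows cols) (hrs : r < s) :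
    pvB S rows cols r c ≤ s := by
  unfold pvB PySem.List.minD
  cases h : PySem.List.min? (((pvValid S rows cols).filter (fun p => p.2 == c && decide (r < p.1))).map (fun p => p.1)) (fun x => x) with
  | none =>
      exfalso
      rw [PySem.List.min?_eq_none_iff, List.map_eq_nil_iff, List.filter_eq_nil_iff] at h
      exact h _ hs (by simp [hrs])
  | some m =>
      have := PySem.List.min?_isMin h s (by rw [pv_mem_bList]; exact ⟨hs, hrs⟩)
      simpa using this

theorem pv_nodup_rounds (R S : List (Int × Int)) (rows cols : Int) :
    (pvRounds R S rows cols).Nodup :=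
  (PySem.Set.nodup_ofList _).filter _

theorem pv_mem_rounds (R S : List (Int × Int)) (rows cols : Int) (p : Int × Int) :
    p ∈ pvRounds R S rows cols ↔
      (0 ≤ p.1 ∧ p.1 < rows ∧ 0 ≤ p.2 ∧ p.2 < cols ∧ p ∈ R ∧ p ∉ S) := by
  constructor
  · intro h
    have h1 := (List.mem_filter.mp h).1
    have h2 := (List.mem_filter.mp h).2
    rw [pv_mem_valid] at h1
    have h3 : p ∉ pvValid S rows cols := by simpa using h2
    rw [pv_mem_valid] at h3
    exact ⟨h1.1, h1.2.1, h1.2.2.1, h1.2.2.2.1, h1.2.2.2.2,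
      fun hs => h3 ⟨h1.1, h1.2.1, h1.2.2.1, h1.2.2.2.1, hs⟩⟩
  · rintro ⟨h1, h2, h3, h4, h5, h6⟩
    refine List.mem_filter.mpr ⟨(pv_mem_valid ..).mpr ⟨h1, h2, h3, h4, h5⟩, ?_⟩
    have : p ∉ pvValid S rows cols := fun hs => h6 ((pv_mem_valid ..).mp hs).2.2.2.2
    simpa using this

-- count of round stones strictly between r and the bound is at most the gap

theorem pv_cnt_le (R S : List (Int × Int)) (rows cols r c b : Int) :
    ((((pvRounds R S rows cols).filter
        (fun p => p.2 == c && decide (r < p.1) && decide (p.1 < b))).length : Int)) ≤ b - r - 1 ∨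
      ((pvRounds R S rows cols).filter
        (fun p => p.2 == c && decide (r < p.1) && decide (p.1 < b))) = [] := by
  by_cases hb : r < b
  · left
    set l := (pvRounds R S rows cols).filter
        (fun p => p.2 == c && decide (r < p.1) && decide (p.1 < b)) with hl
    have hnd : l.Nodup := (pv_nodup_rounds R S rows cols).filter _
    have hsnd : ∀ p ∈ l, p.2 = c := by
      intro p hp
      have := (List.mem_filter.mp hp).2
      simp only [Bool.and_eq_true, beq_iff_eq, decide_eq_true_eq] at this
      exact this.1.1
    have hmapnd : (l.map (fun p => p.1)).Nodup := by
      refine List.Nodup.map_on ?_ hnd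
      intro x hx y hy hxy
      exact Prod.ext hxy ((hsnd x hx).trans (hsnd y hy).symm)
    have hsub : (l.map (fun p => p.1)) ⊆ PySem.List.pyRange (r + 1) b 1 := by
      intro x hx
      rcases List.mem_map.mp hx with ⟨p, hp, rfl⟩
      have := (List.mem_filter.mp hp).2
      simp only [Bool.and_eq_true, beq_iff_eq, decide_eq_true_eq] at this
      rw [PySem.List.mem_pyRange_one]
      omega
    have hlen := (hmapnd.subperm hsub).length_le
    rw [List.length_map, PySem.List.length_pyRange_one] at hlen
    omega
  · right
    rw [List.filter_eq_nil_iff]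
    intro p _ hp
    simp only [Bool.and_eq_true, beq_iff_eq, decide_eq_true_eq] at hp
    omega

theorem pv_le_newRow (R S : List (Int × Int)) (rows cols r c : Int) (hr : r < rows) :
    r ≤ pvNewRow R S rows cols r c := by
  unfold pvNewRow
  have hb := pv_b_gt S rows cols r c hr
  rcases pv_cnt_le R S rows cols r c (pvB S rows cols r c) with h | h
  · omega
  · rw [h]; simp; omega

theorem pv_newRow_le (R S : List (Int × Int)) (rows cols r c : Int) :
    pvNewRow R S rows cols r c ≤ rows - 1 := by
  unfold pvNewRow
  have hb := pv_b_le_rows S rows cols r c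
  have : (0 : Int) ≤ (((pvRounds R S rows cols).filter
      (fun p => p.2 == c && decide (r < p.1) && decide (p.1 < pvB S rows cols r c))).length : Int) :=
    Int.natCast_nonneg _
  omega

-- filter with an extra "or equals a" member counts one more

theorem pv_filter_length_or (l : List (Int × Int)) (hnd : l.Nodup) (p : Int × Int → Bool)
    (a : Int × Int) (ha : a ∈ l) (hpa : p a = false) :
    (l.filter (fun x => p x || x == a)).length = (l.filter p).length + 1 := by
  induction l with
  | nil => cases ha
  | cons x t ih =>
    rcases List.mem_cons.mp ha with heq | hat
    · subst heq
      have hxt : a ∉ t := (List.nodup_cons.mp hnd).1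
      have h1 : t.filter (fun y => p y || y == a) = t.filter p := by
        apply List.filter_congr
        intro y hy
        have hya : (y == a) = false := by
          simp only [beq_eq_false_iff_ne, ne_eq]
          exact fun h => hxt (h ▸ hy)
        simp [hya]
      simp [hpa, h1]
    · have h2 := ih (List.nodup_cons.mp hnd).2 hat
      by_cases hx : p x = true
      · simp [hx, h2]
      · have hpx : p x = false := by simpa using hx
        have hxa : (x == a) = false := by
          simp only [beq_eq_false_iff_ne, ne_eq]
          rintro rfl; exact (List.nodup_cons.mp hnd).1 hat
        simp [hpx, hxa, h2]

-- removing row r from the window does not change b when (r, c) is not a valid square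

theorem pv_b_pred (S : List (Int × Int)) (rows cols r c : Int)
    (hS : (r, c) ∉ pvValid S rows cols) :
    pvB S rows cols (r - 1) c = pvB S rows cols r c := by
  unfold pvB
  rw [List.filter_congr (fun p hp => ?_)]
  rw [Bool.eq_iff_iff]
  simp only [Bool.and_eq_true, beq_iff_eq, decide_eq_true_eq]
  constructor
  · rintro ⟨hc, hr⟩
    refine ⟨hc, ?_⟩
    rcases lt_or_eq_of_le (by omega : r ≤ p.1) with h | h
    · exact h
    · exact absurd (by rwa [show (r, c) = p from by rw [← hc, h]]) hS
  · rintro ⟨hc, hr⟩; exact ⟨hc, by omega⟩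

theorem pv_newRow_square (R S : List (Int × Int)) (rows cols r c : Int)
    (hr0 : 0 ≤ r) (hr : r < rows) (hc0 : 0 ≤ c) (hc : c < cols) (hS : (r, c) ∈ S) :
    pvNewRow R S rows cols (r - 1) c = r - 1 := by
  have hmem : ((r : Int), c) ∈ pvValid S rows cols :=
    (pv_mem_valid ..).mpr ⟨hr0, hr, hc0, hc, hS⟩
  have hb1 : pvB S rows cols (r - 1) c ≤ r := pv_b_min S rows cols (r - 1) c r hmem (by omega)
  have hb2 : r - 1 < pvB S rows cols (r - 1) c := pv_b_gt S rows cols (r - 1) c (by omega)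
  have hb : pvB S rows cols (r - 1) c = r := by omega
  unfold pvNewRow
  rw [hb]
  have hnil : ((pvRounds R S rows cols).filter
      (fun p => p.2 == c && decide (r - 1 < p.1) && decide (p.1 < r))) = [] := by
    rw [List.filter_eq_nil_iff]
    intro p _ hp
    simp only [Bool.and_eq_true, beq_iff_eq, decide_eq_true_eq] at hp
    omega
  rw [hnil]
  simp

theorem pv_newRow_round (R S : List (Int × Int)) (rows cols r c : Int)
    (hr0 : 0 ≤ r) (hr : r < rows) (hc0 : 0 ≤ c) (hc : c < cols)
    (hS : (r, c) ∉ S) (hR : (r, c) ∈ R) :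
    pvNewRow R S rows cols (r - 1) c = pvNewRow R S rows cols r c - 1 := by
  have hSv : ((r : Int), c) ∉ pvValid S rows cols := fun h => hS ((pv_mem_valid ..).mp h).2.2.2.2
  have hb : pvB S rows cols (r - 1) c = pvB S rows cols r c := pv_b_pred S rows cols r c hSv
  have hbgt : r < pvB S rows cols r c := pv_b_gt S rows cols r c hr
  have hmem : ((r : Int), c) ∈ pvRounds R S rows cols :=
    (pv_mem_rounds ..).mpr ⟨hr0, hr, hc0, hc, hR, hS⟩
  unfold pvNewRow
  rw [hb]
  have hcong : ((pvRounds R S rows cols).filter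
      (fun p => p.2 == c && decide (r - 1 < p.1) && decide (p.1 < pvB S rows cols r c))) =
      ((pvRounds R S rows cols).filter
      (fun p => (p.2 == c && decide (r < p.1) && decide (p.1 < pvB S rows cols r c)) || p == (r, c))) := by
    apply List.filter_congr
    intro p _
    rw [Bool.eq_iff_iff]
    simp only [Bool.and_eq_true, Bool.or_eq_true, beq_iff_eq, decide_eq_true_eq, Prod.ext_iff]
    constructor
    · rintro ⟨⟨hpc, hp1⟩, hp2⟩
      rcases lt_or_eq_of_le (by omega : r ≤ p.1) with h | h
      · exact Or.inl ⟨⟨hpc, h⟩, hp2⟩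
      · exact Or.inr ⟨h.symm, hpc⟩
    · rintro (⟨⟨hpc, hp1⟩, hp2⟩ | ⟨hp1, hpc⟩)
      · exact ⟨⟨hpc, by omega⟩, hp2⟩
      · exact ⟨⟨hpc, by omega⟩, by omega⟩
  rw [hcong, pv_filter_length_or _ (pv_nodup_rounds R S rows cols) _ _ hmem (by simp)]
  push_cast
  ring

theorem pv_newRow_empty (R S : List (Int × Int)) (rows cols r c : Int)
    (hS : (r, c) ∉ S) (hR : (r, c) ∉ R) :
    pvNewRow R S rows cols (r - 1) c = pvNewRow R S rows cols r c := by
  have hSv : ((r : Int), c) ∉ pvValid S rows cols := fun h => hS ((pv_mem_valid ..).mp h).2.2.2.2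
  have hb : pvB S rows cols (r - 1) c = pvB S rows cols r c := pv_b_pred S rows cols r c hSv
  unfold pvNewRow
  rw [hb]
  have hcong : ((pvRounds R S rows cols).filter
      (fun p => p.2 == c && decide (r - 1 < p.1) && decide (p.1 < pvB S rows cols r c))) =
      ((pvRounds R S rows cols).filter
      (fun p => p.2 == c && decide (r < p.1) && decide (p.1 < pvB S rows cols r c))) := by
    apply List.filter_congr
    intro p hp
    have hpR : p ∈ R := ((pv_mem_rounds ..).mp hp).2.2.2.2.1
    rw [Bool.eq_iff_iff]
    simp only [Bool.and_eq_true, beq_iff_eq, decide_eq_true_eq]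
    constructor
    · rintro ⟨⟨hpc, hp1⟩, hp2⟩
      rcases lt_or_eq_of_le (by omega : r ≤ p.1) with h | h
      · exact ⟨⟨hpc, h⟩, hp2⟩
      · exact absurd (by rwa [show (r, c) = p from by rw [← hpc, h]]) hR
    · rintro ⟨⟨hpc, hp1⟩, hp2⟩
      exact ⟨⟨hpc, by omega⟩, hp2⟩
  rw [hcong]

def pvFval (R S : List (Int × Int)) (rows cols r c : Int) : Int :=
  if r < pvNewRow R S rows cols r c then pvNewRow R S rows cols r c else -1

def pvIsRd (R S : List (Int × Int)) (r c : Int) : Bool :=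
  !S.contains (r, c) && R.contains (r, c)

def pvRowOut (R S : List (Int × Int)) (rows cols r : Int) : List (Int × Int) :=
  ((PySem.List.pyRange 0 cols 1).filter (fun c => pvIsRd R S r c)).map
    (fun c => (pvNewRow R S rows cols r c, c))

def pvStep (R S : List (Int × Int)) (row : Int) :
    (List Int × List (Int × Int)) → Int → (List Int × List (Int × Int)) := fun st col =>
  if S.contains (row, col) then
    (PySem.List.pySetD st.1 col (-1), st.2)
  else if R.contains (row, col) then
    if PySem.List.pyGetD st.1 col (-1) ≠ -1 then
      (PySem.List.pySetD st.1 col (PySem.List.pyGetD st.1 col (-1) - 1),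
       st.2 ++ [(PySem.List.pyGetD st.1 col (-1), col)])
    else
      (st.1, st.2 ++ [(row, col)])
  else
    if PySem.List.pyGetD st.1 col (-1) = -1 then (PySem.List.pySetD st.1 col row, st.2)
    else st

theorem pv_range_toNat (cols : Int) :
    PySem.List.pyRange 0 cols 1 = PySem.List.pyRange 0 ((cols.toNat : Nat) : Int) 1 := by
  by_cases h : 0 ≤ cols
  · rw [Int.toNat_of_nonneg h]
  · rw [PySem.List.pyRange_one_eq_nil (by omega), PySem.List.pyRange_one_eq_nil (by omega)]

theorem pv_inner_aux (R S : List (Int × Int)) (rows cols r : Int)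
    (hr0 : 0 ≤ r) (hr : r < rows) (m : Nat) (hm : (m : Int) ≤ cols) :
    ∀ (f : List Int) (acc : List (Int × Int)), f.length = cols.toNat →
    (∀ c : Int, 0 ≤ c → c < cols → PySem.List.pyGetD f c (-1) = pvFval R S rows cols r c) →
    ∃ f' : List Int,
      (PySem.List.pyRange 0 (m : Int) 1).foldl (pvStep R S r) (f, acc) =
        (f', acc ++ ((PySem.List.pyRange 0 (m : Int) 1).filter (fun c => pvIsRd R S r c)).map
          (fun c => (pvNewRow R S rows cols r c, c))) ∧
      f'.length = cols.toNat ∧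
      (∀ c : Int, 0 ≤ c → c < cols →
        PySem.List.pyGetD f' c (-1) =
          if c < (m : Int) then pvFval R S rows cols (r - 1) c else pvFval R S rows cols r c) := by
  induction m with
  | zero =>
    intro f acc hlen hf
    refine ⟨f, ?_, hlen, ?_⟩
    · rw [PySem.List.pyRange_one_eq_nil (by omega)]; simp
    · intro c hc0 hc
      rw [if_neg (by omega)]
      exact hf c hc0 hc
  | succ m ih =>
    intro f acc hlen hf
    have hm' : (m : Int) ≤ cols := by push_cast at hm ⊢; omega
    obtain ⟨f1, heq, hlen1, hf1⟩ := ih hm' f acc hlen hf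
    have hrange : PySem.List.pyRange 0 ((m + 1 : Nat) : Int) 1 =
        PySem.List.pyRange 0 (m : Int) 1 ++ [(m : Int)] := by
      push_cast
      exact PySem.List.pyRange_one_succ_right (by omega)
    have hmc : (m : Int) < cols := by push_cast at hm; omega
    have hmlen : m < f1.length := by rw [hlen1]; omega
    -- the value read at column m
    have hg : PySem.List.pyGetD f1 (m : Int) (-1) = pvFval R S rows cols r (m : Int) := by
      rw [hf1 (m : Int) (by omega) hmc, if_neg (by omega)]
    rw [hrange, List.foldl_append, heq]
    simp only [List.foldl_cons, List.foldl_nil, List.filter_append, List.map_append]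
    by_cases hS : S.contains (r, (m : Int))
    · -- square stone at (r, m)
      have hSm : ((r : Int), (m : Int)) ∈ S := by simpa using hS
      refine ⟨PySem.List.pySetD f1 (m : Int) (-1), ?_, ?_, ?_⟩
      · rw [pvStep]
        simp only [hS, if_true]
        have hird : pvIsRd R S r (m : Int) = false := by unfold pvIsRd; rw [hS]; rfl
        simp [hird]
      · rw [PySem.List.length_pySetD, hlen1]
      · intro c hc0 hc
        have hcast : c = ((c.toNat : Nat) : Int) := by omega
        rw [hcast, PySem.List.pyGetD_pySetD_natCast f1 m c.toNat _ _ hmlen]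
        by_cases hcm : c.toNat = m
        · rw [if_pos hcm, if_pos (by push_cast; omega), hcm]
          unfold pvFval
          rw [pv_newRow_square R S rows cols r (m : Int) hr0 hr (by omega) hmc hSm,
            if_neg (by omega)]
        · rw [if_neg hcm, ← hcast, hf1 c hc0 hc]
          by_cases h2 : c < (m : Int)
          · rw [if_pos h2, if_pos (by push_cast; omega)]
          · rw [if_neg h2, if_neg (by push_cast; omega)]
    · by_cases hR : R.contains (r, (m : Int))
      · -- round stone at (r, m)
        have hRm : ((r : Int), (m : Int)) ∈ R := by simpa using hR
        have hSm : ((r : Int), (m : Int)) ∉ S := by simpa using hS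
        have hstep := pv_newRow_round R S rows cols r (m : Int) hr0 hr (by omega) hmc hSm hRm
        have hle := pv_le_newRow R S rows cols r (m : Int) hr
        have hSc : S.contains (r, (m : Int)) = false := by simpa using hS
        have hisrd : pvIsRd R S r (m : Int) = true := by
          unfold pvIsRd; rw [hSc, hR]; rfl
        by_cases hgne : PySem.List.pyGetD f1 (m : Int) (-1) = -1
        · -- first_empty = -1 : stone stays at (r, m)
          have hnr : pvNewRow R S rows cols r (m : Int) = r := by
            rw [hg] at hgne
            unfold pvFval at hgne
            by_cases h : r < pvNewRow R S rows cols r (m : Int)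
            · rw [if_pos h] at hgne; omega
            · omega
          refine ⟨f1, ?_, hlen1, ?_⟩
          · rw [pvStep]
            simp only [hS, if_false, hR, if_true, hgne, ne_eq, not_true_eq_false,
              List.append_assoc]
            simp [hisrd, hnr]
          · intro c hc0 hc
            rw [hf1 c hc0 hc]
            by_cases h2 : c < (m : Int)
            · rw [if_pos h2, if_pos (by push_cast; omega)]
            · by_cases h3 : c = (m : Int)
              · rw [if_neg h2, if_pos (by push_cast; omega)]
                subst h3
                unfold pvFval
                rw [hstep, hnr, if_neg (by omega), if_neg (by omega)]
              · rw [if_neg h2, if_neg (by push_cast; omega)]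
        · -- stone moves to first_empty
          have hnrg : pvNewRow R S rows cols r (m : Int) = PySem.List.pyGetD f1 (m : Int) (-1) ∧
              r < pvNewRow R S rows cols r (m : Int) := by
            rw [hg] at hgne ⊢
            unfold pvFval at hgne ⊢
            by_cases h : r < pvNewRow R S rows cols r (m : Int)
            · rw [if_pos h]; omega
            · rw [if_neg h] at hgne; omega
          refine ⟨PySem.List.pySetD f1 (m : Int) (PySem.List.pyGetD f1 (m : Int) (-1) - 1), ?_, ?_, ?_⟩
          · rw [pvStep]
            simp only [hS, if_false, hR, hgne, ne_eq, if_pos, List.append_assoc]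
            simp [hisrd, hnrg.1]
          · rw [PySem.List.length_pySetD, hlen1]
          · intro c hc0 hc
            have hcast : c = ((c.toNat : Nat) : Int) := by omega
            rw [hcast, PySem.List.pyGetD_pySetD_natCast f1 m c.toNat _ _ hmlen]
            by_cases hcm : c.toNat = m
            · rw [if_pos hcm, if_pos (by push_cast; omega), hcm]
              unfold pvFval
              rw [hstep, if_pos (by omega), hnrg.1]
            · rw [if_neg hcm, ← hcast, hf1 c hc0 hc]
              by_cases h2 : c < (m : Int)
              · rw [if_pos h2, if_pos (by push_cast; omega)]
              · rw [if_neg h2, if_neg (by push_cast; omega)]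
      · -- empty cell
        have hRm : ((r : Int), (m : Int)) ∉ R := by simpa using hR
        have hSm : ((r : Int), (m : Int)) ∉ S := by simpa using hS
        have hstep := pv_newRow_empty R S rows cols r (m : Int) hSm hRm
        have hRc : R.contains (r, (m : Int)) = false := by simpa using hR
        have hisrd : pvIsRd R S r (m : Int) = false := by
          unfold pvIsRd; rw [hRc, Bool.and_false]
        by_cases hgne : PySem.List.pyGetD f1 (m : Int) (-1) = -1
        · -- becomes the first empty tile
          have hnr : pvNewRow R S rows cols r (m : Int) = r := by
            rw [hg] at hgne
            unfold pvFval at hgne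
            have hle := pv_le_newRow R S rows cols r (m : Int) hr
            by_cases h : r < pvNewRow R S rows cols r (m : Int)
            · rw [if_pos h] at hgne; omega
            · omega
          refine ⟨PySem.List.pySetD f1 (m : Int) r, ?_, ?_, ?_⟩
          · rw [pvStep]
            simp only [hS, hR, hgne, if_pos]
            simp [hisrd]
          · rw [PySem.List.length_pySetD, hlen1]
          · intro c hc0 hc
            have hcast : c = ((c.toNat : Nat) : Int) := by omega
            rw [hcast, PySem.List.pyGetD_pySetD_natCast f1 m c.toNat _ _ hmlen]
            by_cases hcm : c.toNat = m
            · rw [if_pos hcm, if_pos (by push_cast; omega), hcm]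
              unfold pvFval
              rw [hstep, hnr, if_pos (by omega)]
            · rw [if_neg hcm, ← hcast, hf1 c hc0 hc]
              by_cases h2 : c < (m : Int)
              · rw [if_pos h2, if_pos (by push_cast; omega)]
              · rw [if_neg h2, if_neg (by push_cast; omega)]
        · refine ⟨f1, ?_, hlen1, ?_⟩
          · rw [pvStep]
            simp only [hS, hR, hgne]
            simp [hisrd]
          · intro c hc0 hc
            rw [hf1 c hc0 hc]
            by_cases h2 : c < (m : Int)
            · rw [if_pos h2, if_pos (by push_cast; omega)]
            · by_cases h3 : c = (m : Int)
              · rw [if_neg h2, if_pos (by push_cast; omega)]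
                subst h3
                have hgg : pvFval R S rows cols r (m : Int) ≠ -1 := hg ▸ hgne
                unfold pvFval at hgg ⊢
                rw [hstep]
                by_cases h : r < pvNewRow R S rows cols r (m : Int)
                · rw [if_pos h, if_pos (by omega)]
                · rw [if_neg h] at hgg; exact absurd rfl hgg
              · rw [if_neg h2, if_neg (by push_cast; omega)]

theorem pv_inner (R S : List (Int × Int)) (rows cols r : Int)
    (hr0 : 0 ≤ r) (hr : r < rows) (f : List Int) (acc : List (Int × Int))
    (hlen : f.length = cols.toNat)
    (hf : ∀ c : Int, 0 ≤ c → c < cols → PySem.List.pyGetD f c (-1) = pvFval R S rows cols r c) :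
    ∃ f' : List Int,
      (PySem.List.pyRange 0 cols 1).foldl (pvStep R S r) (f, acc) =
        (f', acc ++ pvRowOut R S rows cols r) ∧
      f'.length = cols.toNat ∧
      (∀ c : Int, 0 ≤ c → c < cols →
        PySem.List.pyGetD f' c (-1) = pvFval R S rows cols (r - 1) c) := by
  by_cases hcols : 0 < cols
  · obtain ⟨f', h1, h2, h3⟩ :=
      pv_inner_aux R S rows cols r hr0 hr cols.toNat (by omega) f acc hlen hf
    refine ⟨f', ?_, h2, ?_⟩
    · rw [pvRowOut, pv_range_toNat cols]
      exact h1
    · intro c hc0 hc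
      rw [h3 c hc0 hc, if_pos (by omega)]
  · refine ⟨f, ?_, hlen, ?_⟩
    · rw [pvRowOut, PySem.List.pyRange_one_eq_nil (by omega)]
      simp
    · intro c hc0 hc
      omega

theorem pv_outer_aux (R S : List (Int × Int)) (rows cols : Int) (n : Nat) :
    ∀ (r : Int), (r + 1).toNat = n → r < rows →
    ∀ (f : List Int) (acc : List (Int × Int)), f.length = cols.toNat →
    (∀ c : Int, 0 ≤ c → c < cols → PySem.List.pyGetD f c (-1) = pvFval R S rows cols r c) →
    ((PySem.List.pyRange r (-1) (-1)).foldl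
        (fun st row => (PySem.List.pyRange 0 cols 1).foldl (pvStep R S row) st) (f, acc)).2 =
      acc ++ (PySem.List.pyRange r (-1) (-1)).flatMap (pvRowOut R S rows cols) := by
  induction n with
  | zero =>
    intro r hn hr f acc hlen hf
    rw [PySem.List.pyRange_neg_one_eq_nil (by omega)]
    simp
  | succ n ih =>
    intro r hn hr f acc hlen hf
    have hr0 : 0 ≤ r := by omega
    rw [PySem.List.pyRange_neg_one_cons (by omega : (-1 : Int) < r)]
    simp only [List.foldl_cons, List.flatMap_cons]
    obtain ⟨f', h1, h2, h3⟩ := pv_inner R S rows cols r hr0 hr f acc hlen hf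
    rw [h1, ih (r - 1) (by omega) (by omega) f' (acc ++ pvRowOut R S rows cols r) h2 h3,
      List.append_assoc]

theorem pv_A_eq (R S : List (Int × Int)) (rows cols : Int) :
    move_stones_south R S rows cols =
      (PySem.List.pyRange (rows - 1) (-1) (-1)).flatMap (pvRowOut R S rows cols) := by
  have hport : move_stones_south R S rows cols =
      ((PySem.List.pyRange (rows - 1) (-1) (-1)).foldl
        (fun st row => (PySem.List.pyRange 0 cols 1).foldl (pvStep R S row) st)
        ((PySem.List.pyRange 0 cols 1).map (fun _ => (-1 : Int)), [])).2 := rfl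
  rw [hport, pv_outer_aux R S rows cols rows.toNat (rows - 1) (by omega) (by omega)
    _ _ (by simp [PySem.List.length_pyRange_one])
    (fun c hc0 hc => ?_), List.nil_append]
  rw [PySem.List.pyGetD_map_pyRange_of_nonneg _ cols c _ hc0 hc]
  unfold pvFval
  rw [if_neg (by have := pv_newRow_le R S rows cols (rows - 1) c; omega)]

theorem pv_nodup_range_desc (a b : Int) : (PySem.List.pyRange a b (-1)).Nodup := by
  rw [PySem.List.pyRange_neg_one_eq_reverse]
  exact List.nodup_reverse.mpr (PySem.List.nodup_pyRange_one _ _)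

theorem pv_pairwise_gt_range_desc (a b : Int) :
    (PySem.List.pyRange a b (-1)).Pairwise (fun x y => y < x) := by
  rw [PySem.List.pyRange_neg_one_eq_reverse]
  exact (List.pairwise_reverse).mpr (PySem.List.pairwise_lt_pyRange_one _ _)

theorem pv_sorted_rows (R S : List (Int × Int)) (rows cols : Int) :
    PySem.List.sorted (PySem.Set.ofList ((pvRounds R S rows cols).map (fun p => p.1)))
      (fun x => x) true =
    (PySem.List.pyRange (rows - 1) (-1) (-1)).filter
      (fun r => (pvRounds R S rows cols).any (fun p => p.1 == r)) := by
  apply PySem.List.sorted_rev_eq_of_perm_of_pairwise_gt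
  · rw [List.perm_ext_iff_of_nodup ((pv_nodup_range_desc _ _).filter _)
      (PySem.Set.nodup_ofList _)]
    intro a
    rw [List.mem_filter, PySem.Set.mem_ofList, PySem.List.mem_pyRange_neg_one,
      List.any_eq_true, List.mem_map]
    constructor
    · rintro ⟨_, p, hp, hpa⟩
      exact ⟨p, hp, by simpa using hpa⟩
    · rintro ⟨p, hp, rfl⟩
      have := (pv_mem_rounds R S rows cols p).mp hp
      exact ⟨by omega, p, hp, by simp⟩
  · exact (pv_pairwise_gt_range_desc _ _).filter _

theorem pv_sorted_cols (R S : List (Int × Int)) (rows cols r : Int)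
    (hr0 : 0 ≤ r) (hr : r < rows) :
    PySem.List.sorted (((pvRounds R S rows cols).filter (fun p => p.1 == r)).map (fun p => p.2))
      (fun x => x) false =
    (PySem.List.pyRange 0 cols 1).filter (fun c => pvIsRd R S r c) := by
  apply PySem.List.sorted_eq_of_perm_of_pairwise_lt
  · have hnodup : (((pvRounds R S rows cols).filter (fun p => p.1 == r)).map (fun p => p.2)).Nodup := by
      refine List.Nodup.map_on ?_ ((pv_nodup_rounds R S rows cols).filter _)
      intro x hx y hy hxy
      have hx1 : x.1 = r := by simpa using (List.mem_filter.mp hx).2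
      have hy1 : y.1 = r := by simpa using (List.mem_filter.mp hy).2
      exact Prod.ext (hx1.trans hy1.symm) hxy
    rw [List.perm_ext_iff_of_nodup ((PySem.List.nodup_pyRange_one _ _).filter _) hnodup]
    intro c
    rw [List.mem_filter, PySem.List.mem_pyRange_one, List.mem_map]
    constructor
    · rintro ⟨hcr, hrd⟩
      unfold pvIsRd at hrd
      rw [Bool.and_eq_true, Bool.not_eq_eq_eq_not, Bool.not_true] at hrd
      have hS : ((r : Int), c) ∉ S := by simpa using hrd.1
      have hR : ((r : Int), c) ∈ R := by simpa using hrd.2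
      refine ⟨(r, c), List.mem_filter.mpr ⟨?_, by simp⟩, rfl⟩
      exact (pv_mem_rounds ..).mpr ⟨hr0, hr, hcr.1, hcr.2, hR, hS⟩
    · rintro ⟨p, hp, rfl⟩
      have hp1 : p.1 = r := by simpa using (List.mem_filter.mp hp).2
      have hm := (pv_mem_rounds ..).mp (List.mem_filter.mp hp).1
      refine ⟨⟨hm.2.2.1, hm.2.2.2.1⟩, ?_⟩
      unfold pvIsRd
      rw [show ((r : Int), p.2) = p from by rw [← hp1]]
      have h1 : S.contains p = false := by simpa using hm.2.2.2.2.2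
      have h2 : R.contains p = true := by simpa using hm.2.2.2.2.1
      rw [h1, h2]; rfl
  · exact (PySem.List.pairwise_lt_pyRange_one _ _).filter _

theorem pv_flatMap_filter {α β : Type} (l : List α) (p : α → Bool) (g : α → List β)
    (h : ∀ x ∈ l, p x = false → g x = []) :
    (l.filter p).flatMap g = l.flatMap g := by
  induction l with
  | nil => rfl
  | cons x t ih =>
    rw [List.filter_cons]
    by_cases hx : p x = true
    · rw [if_pos hx, List.flatMap_cons, List.flatMap_cons,
        ih (fun y hy => h y (List.mem_cons_of_mem _ hy))]
    · rw [if_neg hx, List.flatMap_cons, h x (List.mem_cons_self) (by simpa using hx),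
        List.nil_append, ih (fun y hy => h y (List.mem_cons_of_mem _ hy))]

theorem pv_flatMap_congr {α β : Type} (l : List α) (g h : α → List β)
    (hgh : ∀ x ∈ l, g x = h x) : l.flatMap g = l.flatMap h := by
  induction l with
  | nil => rfl
  | cons x t ih =>
    rw [List.flatMap_cons, List.flatMap_cons, hgh x List.mem_cons_self,
      ih (fun y hy => hgh y (List.mem_cons_of_mem _ hy))]

theorem pv_B_eq (R S : List (Int × Int)) (rows cols : Int) :
    move_stones_south_alt R S rows cols =
      (PySem.List.pyRange (rows - 1) (-1) (-1)).flatMap (pvRowOut R S rows cols) := by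
  unfold move_stones_south_alt
  rw [PySem.List.foldl_append_eq_flatMap, List.nil_append, pv_sorted_rows,
    pv_flatMap_filter _ _ _ (fun r _ hany => ?empty)]
  case empty =>
    have hfe : (pvRounds R S rows cols).filter (fun p => p.1 == r) = [] := by
      rw [List.filter_eq_nil_iff]
      intro p hp
      rw [List.any_eq_false] at hany
      exact hany p hp
    rw [hfe]
    rfl
  apply pv_flatMap_congr
  intro r hrmem
  rw [PySem.List.mem_pyRange_neg_one] at hrmem
  rw [pv_sorted_cols R S rows cols r (by omega) (by omega)]
  rfl

-- ===== VERDICT (by name: the statement is the Claim_ definition above) =====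
theorem move_stones_south_spec : Claim_equal_move_stones_south := by
  intro R S rows cols _
  unfold Spec_move_stones_south
  rw [pv_A_eq, pv_B_eq]
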